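-- pv_equiv track=rewrite | github.com/ghollisjr/datum | datum/utils.py | split_identifier
-- ===== SOURCE A (Python) =====
-- def split_identifier(raw):
--     """Split a dotted SQL identifier, respecting double-quote and bracket quoting.
--
--     Dots inside "quoted.name" or [bracket.name] are preserved.
--     Each returned part has surrounding quotes/brackets stripped.
--
--     >>> split_identifier('DVF."F$DB.INST"')
--     ['DVF', 'F$DB.INST']
--     >>> split_identifier('[my.schema].[my.table]')
--     ['my.schema', 'my.table']
--     >>> split_identifier('dbo.users')
--     ['dbo', 'users']
--     """
--     parts = []
--     current = []
--     in_dquote = False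
--     in_bracket = False
--     in_backtick = False
--     for ch in raw:
--         if in_dquote:
--             if ch == '"':
--                 in_dquote = False
--             else:
--                 current.append(ch)
--         elif in_bracket:
--             if ch == ']':
--                 in_bracket = False
--             else:
--                 current.append(ch)
--         elif in_backtick:
--             if ch == '`':
--                 in_backtick = False
--             else:
--                 current.append(ch)
--         elif ch == '"':
--             in_dquote = True
--         elif ch == '[':
--             in_bracket = True
--         elif ch == '`':
--             in_backtick = True
--         elif ch == '.':
--             parts.append(''.join(current))
--             current = []
--         else:
--             current.append(ch)
--     parts.append(''.join(current))
--     return parts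
-- ===== SOURCE B (Python) =====
-- def split_identifier(raw):
--     """Split a dotted SQL identifier, respecting double-quote and bracket quoting."""
--     CLOSER = {'"': '"', '[': ']', '`': '`'}
--     parts = []
--     current = ''
--     i = 0
--     n = len(raw)
--     while i < n:
--         ch = raw[i]
--         if ch == '.':
--             parts.append(current)
--             current = ''
--             i += 1
--         elif ch in CLOSER:
--             close = raw.find(CLOSER[ch], i + 1)
--             if close == -1:
--                 current += raw[i + 1:]
--                 i = n
--             else:
--                 current += raw[i + 1:close]
--                 i = close + 1
--         else:
--             current += ch
--             i += 1
--     parts.append(current)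
--     return parts
-- ===== Notes on version B (the rewrite author's own statement) =====
-- stated objective: alternative
-- what changed: Replaced A's per-character three-boolean-flag state machine with an index-based find-and-jump scan that, on an opening delimiter, locates the closing quote with raw.find and splices the whole quoted span into the buffer with one slice.
import Mathlib
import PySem

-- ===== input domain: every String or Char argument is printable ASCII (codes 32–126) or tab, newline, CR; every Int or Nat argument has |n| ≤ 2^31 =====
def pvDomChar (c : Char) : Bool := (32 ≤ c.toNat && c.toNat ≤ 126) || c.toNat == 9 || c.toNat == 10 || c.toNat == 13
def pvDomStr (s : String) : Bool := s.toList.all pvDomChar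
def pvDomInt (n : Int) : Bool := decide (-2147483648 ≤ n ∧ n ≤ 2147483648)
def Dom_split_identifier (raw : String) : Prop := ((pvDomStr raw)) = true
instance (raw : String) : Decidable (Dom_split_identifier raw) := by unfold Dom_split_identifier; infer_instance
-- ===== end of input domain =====

-- B replaces A's per-character three-flag state machine by a find-and-jump scan that
-- splices each quoted span into the buffer in one slice (objective: alternative; same return value).

-- ===== PORT A =====
-- state machine: parts, current buffer, three exclusive in-quote flags, branch order as in A
def aGo (parts : List String) (current : List Char) (dq br bt : Bool) : List Char → List String
  | [] => parts ++ [String.ofList current]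
  | ch :: rest =>
    if dq then
      if ch = '"' then aGo parts current false br bt rest
      else aGo parts (current ++ [ch]) dq br bt rest
    else if br then
      if ch = ']' then aGo parts current dq false bt rest
      else aGo parts (current ++ [ch]) dq br bt rest
    else if bt then
      if ch = '`' then aGo parts current dq br false rest
      else aGo parts (current ++ [ch]) dq br bt rest
    else if ch = '"' then aGo parts current true br bt rest
    else if ch = '[' then aGo parts current dq true bt rest
    else if ch = '`' then aGo parts current dq br true rest
    else if ch = '.' then aGo (parts ++ [String.ofList current]) [] dq br bt rest
    else aGo parts (current ++ [ch]) dq br bt rest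

def split_identifier (raw : String) : List String :=
  aGo [] [] false false false raw.toList

-- ===== PORT B =====
-- termination helper for bGo (cited in its decreasing_by)
theorem tail_dropWhile_lt (p : Char → Bool) (c : Char) (rest : List Char) :
    ((rest.dropWhile p).tail).length < (c :: rest).length := by
  have h1 := List.length_dropWhile_le p rest
  have h2 := List.length_tail (l := rest.dropWhile p)
  simp only [List.length_cons]; omega

-- find-and-jump: on an opening delimiter, locate the closer and take the whole quoted span at once
-- (Python's raw.find(closer, i+1) == -1 test and the two slices are takeWhile/dropWhile of the rest)
def bGo (parts : List String) (current : String) : List Char → List String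
  | [] => parts ++ [current]
  | ch :: rest =>
    if ch = '.' then bGo (parts ++ [current]) "" rest
    else if ch = '"' ∨ ch = '[' ∨ ch = '`' then
      let closer := if ch = '[' then ']' else ch
      let pre := rest.takeWhile (fun c => c ≠ closer)
      let d := rest.dropWhile (fun c => c ≠ closer)
      if d = [] then parts ++ [current ++ String.ofList pre]   -- find returned -1: take the rest, stop
      else bGo parts (current ++ String.ofList pre) d.tail
    else bGo parts (current.push ch) rest
  termination_by l => l.length
  decreasing_by
    · simp
    · exact tail_dropWhile_lt _ ch rest
    · simp

def split_identifier_alt (raw : String) : List String :=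
  bGo [] "" raw.toList

-- ===== PRECONDITION & SPEC =====
def Spec_split_identifier (raw : String) (out : List String) : Prop := out = split_identifier_alt raw
instance (raw : String) (out : List String) : Decidable (Spec_split_identifier raw out) := by unfold Spec_split_identifier; infer_instance

-- ===== CLAIM (what is proved, stated in full; the proofs are below) =====
def Claim_equal_split_identifier : Prop := ∀ (raw : String), Dom_split_identifier raw → Spec_split_identifier raw (split_identifier raw)

-- ===== LEMMAS AND PROOFS =====

-- A's in-double-quote state consumes characters up to the closing '"' — exactly a takeWhile/dropWhile split
theorem aGo_dq (l : List Char) : ∀ (parts : List String) (cur : List Char),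
    aGo parts cur true false false l =
      if l.dropWhile (· ≠ '"') = [] then parts ++ [String.ofList (cur ++ l)]
      else aGo parts (cur ++ l.takeWhile (· ≠ '"')) false false false (l.dropWhile (· ≠ '"')).tail := by
  induction l with
  | nil => intro parts cur; simp [aGo]
  | cons c rest ih =>
    intro parts cur
    by_cases hc : c = '"'
    · subst hc; simp [aGo, List.dropWhile, List.takeWhile]
    · simp [aGo, hc, List.dropWhile, List.takeWhile, ih]

theorem aGo_br (l : List Char) : ∀ (parts : List String) (cur : List Char),
    aGo parts cur false true false l =
      if l.dropWhile (· ≠ ']') = [] then parts ++ [String.ofList (cur ++ l)]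
      else aGo parts (cur ++ l.takeWhile (· ≠ ']')) false false false (l.dropWhile (· ≠ ']')).tail := by
  induction l with
  | nil => intro parts cur; simp [aGo]
  | cons c rest ih =>
    intro parts cur
    by_cases hc : c = ']'
    · subst hc; simp [aGo, List.dropWhile, List.takeWhile]
    · simp [aGo, hc, List.dropWhile, List.takeWhile, ih]

theorem aGo_bt (l : List Char) : ∀ (parts : List String) (cur : List Char),
    aGo parts cur false false true l =
      if l.dropWhile (· ≠ '`') = [] then parts ++ [String.ofList (cur ++ l)]
      else aGo parts (cur ++ l.takeWhile (· ≠ '`')) false false false (l.dropWhile (· ≠ '`')).tail := by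
  induction l with
  | nil => intro parts cur; simp [aGo]
  | cons c rest ih =>
    intro parts cur
    by_cases hc : c = '`'
    · subst hc; simp [aGo, List.dropWhile, List.takeWhile]
    · simp [aGo, hc, List.dropWhile, List.takeWhile, ih]

theorem push_ofList (s : String) (c : Char) : s.push c = s ++ String.ofList [c] :=
  (String.append_left_inj s).mp rfl

theorem takeWhile_of_dropWhile_nil {p : Char → Bool} {l : List Char}
    (h : l.dropWhile p = []) : l.takeWhile p = l := by
  have := List.takeWhile_append_dropWhile (p := p) (l := l)
  rw [h] at this; simpa using this

set_option maxRecDepth 10000 in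
theorem aGo_eq_bGo (n : ℕ) : ∀ (l : List Char), l.length ≤ n →
    ∀ (parts : List String) (cur : List Char),
      aGo parts cur false false false l = bGo parts (String.ofList cur) l := by
  induction n with
  | zero =>
    intro l hl parts cur
    have : l = [] := List.eq_nil_of_length_eq_zero (Nat.le_zero.mp hl)
    subst this; simp [aGo, bGo]
  | succ n ih =>
    intro l hl parts cur
    cases l with
    | nil => simp [aGo, bGo]
    | cons ch rest =>
      have hr : rest.length ≤ n := by simpa using hl
      by_cases h1 : ch = '"'
      · subst h1
        rw [show aGo parts cur false false false ('"' :: rest) =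
              aGo parts cur true false false rest from by simp [aGo]]
        rw [aGo_dq]
        conv_rhs => rw [bGo]
        simp
        by_cases h : ∀ x ∈ rest, ¬x = '"'
        · have hdnil : List.dropWhile (fun x => !decide (x = '"')) rest = [] := by
            rw [List.dropWhile_eq_nil_iff]; intro x hx; simpa using h x hx
          rw [if_pos h, if_pos h, takeWhile_of_dropWhile_nil hdnil]
        · have hlen2 : ((List.dropWhile (fun x => !decide (x = '"')) rest).tail).length ≤ n := by
            have hd1 := List.length_dropWhile_le (fun x => !decide (x = '"')) rest
            have hd2 := List.length_tail (l := List.dropWhile (fun x => !decide (x = '"')) rest)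
            omega
          simp [h, ih _ hlen2, String.ofList_append]
      · by_cases h2 : ch = '['
        · subst h2
          rw [show aGo parts cur false false false ('[' :: rest) =
                aGo parts cur false true false rest from by simp [aGo]]
          rw [aGo_br]
          conv_rhs => rw [bGo]
          simp
          by_cases h : ∀ x ∈ rest, ¬x = ']'
          · have hdnil : List.dropWhile (fun x => !decide (x = ']')) rest = [] := by
              rw [List.dropWhile_eq_nil_iff]; intro x hx; simpa using h x hx
            rw [if_pos h, if_pos h, takeWhile_of_dropWhile_nil hdnil]
          · have hlen2 : ((List.dropWhile (fun x => !decide (x = ']')) rest).tail).length ≤ n := by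
              have hd1 := List.length_dropWhile_le (fun x => !decide (x = ']')) rest
              have hd2 := List.length_tail (l := List.dropWhile (fun x => !decide (x = ']')) rest)
              omega
            simp [h, ih _ hlen2, String.ofList_append]
        · by_cases h3 : ch = '`'
          · subst h3
            rw [show aGo parts cur false false false ('`' :: rest) =
                  aGo parts cur false false true rest from by simp [aGo]]
            rw [aGo_bt]
            conv_rhs => rw [bGo]
            simp
            by_cases h : ∀ x ∈ rest, ¬x = '`'
            · have hdnil : List.dropWhile (fun x => !decide (x = '`')) rest = [] := by
                rw [List.dropWhile_eq_nil_iff]; intro x hx; simpa using h x hx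
              rw [if_pos h, if_pos h, takeWhile_of_dropWhile_nil hdnil]
            · have hlen2 : ((List.dropWhile (fun x => !decide (x = '`')) rest).tail).length ≤ n := by
                have hd1 := List.length_dropWhile_le (fun x => !decide (x = '`')) rest
                have hd2 := List.length_tail (l := List.dropWhile (fun x => !decide (x = '`')) rest)
                omega
              simp [h, ih _ hlen2, String.ofList_append]
          · by_cases h4 : ch = '.'
            · subst h4
              rw [show aGo parts cur false false false ('.' :: rest) =
                    aGo (parts ++ [String.ofList cur]) [] false false false rest from by simp [aGo]]
              conv_rhs => rw [bGo]
              simp [ih _ hr]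
            · rw [show aGo parts cur false false false (ch :: rest) =
                    aGo parts (cur ++ [ch]) false false false rest from by simp [aGo, h1, h2, h3, h4]]
              conv_rhs => rw [bGo]
              simp [h1, h2, h3, h4, ih _ hr, String.ofList_append, push_ofList]

-- ===== VERDICT (by name: the statement is the Claim_ definition above) =====
theorem split_identifier_spec : Claim_equal_split_identifier := by
  intro raw _
  unfold Spec_split_identifier split_identifier split_identifier_alt
  exact aGo_eq_bGo raw.toList.length raw.toList le_rfl [] []
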